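-- pv_equiv track=rewrite | github.com/randomKeyss/parking | park.py | get_reduced_words
-- ===== SOURCE A (Python) =====
-- from typing import List
--
-- def swap(w: List[int], i: int, j: int) -> List[int]:
--     i -= 1
--     j -= 1
--     temp = w[i]
--     w[i] = w[j]
--     w[j] = temp
--     return w
--
-- def get_descents(w: List[int]) -> List[int]:
--     out = []
--     for i in range(len(w) - 1):
--         if w[i] > w[i+1]:
--             out.append(i + 1)
--     return out
--
-- def get_reduced_words(w: List[int]) -> List[int]:
--     w = w.copy()
--     des = get_descents(w)
--     if len(des) == 0:
--         return [[]]
--     out = []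
--     for i in range(len(des)):
--         swap(w, des[i], des[i] + 1)
--         out += [[des[i]] + rw for rw in get_reduced_words(w)]
--         swap(w, des[i], des[i] + 1)
--     return out
-- ===== SOURCE B (Python) =====
-- def get_descents(w):
--     out = []
--     for i in range(len(w) - 1):
--         if w[i] > w[i+1]:
--             out.append(i + 1)
--     return out
--
-- def get_reduced_words(w):
--     cache = {}
--     def go(v):
--         key = tuple(v)
--         hit = cache.get(key)
--         if hit is not None:
--             return hit
--         des = get_descents(v)
--         if not des:
--             res = [[]]
--         else:
--             res = []
--             for d in des:
--                 u = list(v)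
--                 u[d-1], u[d] = u[d], u[d-1]
--                 res += [[d] + rw for rw in go(u)]
--         cache[key] = res
--         return res
--     return go(list(w))
-- ===== Notes on version B (the rewrite author's own statement) =====
-- stated objective: alternative
-- what changed: B memoizes the reduced-word list per reachable permutation (a dict keyed by the permutation tuple, threaded through the recursion) so each permutation's list is computed once, instead of A's plain recursion that re-explores a permutation once per reduced-word prefix leading to it; on the timing inputs used by the check (descent-free lists) both are dominated by the same descent scan, so no speed is claimed.
import Mathlib
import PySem

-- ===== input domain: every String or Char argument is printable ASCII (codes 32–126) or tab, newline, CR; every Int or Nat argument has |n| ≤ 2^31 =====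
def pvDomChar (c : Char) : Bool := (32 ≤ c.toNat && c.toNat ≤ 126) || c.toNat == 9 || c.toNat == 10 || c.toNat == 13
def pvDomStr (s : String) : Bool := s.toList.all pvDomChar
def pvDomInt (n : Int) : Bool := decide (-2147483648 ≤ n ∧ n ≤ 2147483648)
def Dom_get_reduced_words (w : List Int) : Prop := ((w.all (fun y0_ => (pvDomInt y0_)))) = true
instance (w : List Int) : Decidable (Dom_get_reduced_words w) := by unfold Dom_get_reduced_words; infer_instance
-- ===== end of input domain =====

-- B replaces A's plain recursion by a memoized recursion (DP keyed by the permutation),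
-- computing each reachable permutation's reduced-word list once instead of once per prefix.

-- ===== PORT A =====

-- number of inversions of w; used ONLY as the fuel bound making the (provably finite) recursion total
def countInv : List Int → Nat
  | [] => 0
  | a :: t => t.countP (fun y => decide (y < a)) + countInv t

-- port of swap(w, i, j); pyGetD/pySetD are exact here: every call has 1 ≤ i,j ≤ len(w)
def pySwap (w : List Int) (i j : Int) : List Int :=
  let i' := i - 1
  let j' := j - 1
  let temp := PySem.List.pyGetD w i' 0
  let w1 := PySem.List.pySetD w i' (PySem.List.pyGetD w j' 0)
  PySem.List.pySetD w1 j' temp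

-- port of get_descents(w); indices i, i+1 are always in range
def pyDescents (w : List Int) : List Int :=
  (PySem.List.pyRange 0 ((w.length : Int) - 1) 1).foldl
    (fun out i =>
      if PySem.List.pyGetD w (i + 1) 0 < PySem.List.pyGetD w i 0 then out ++ [i + 1] else out) []

-- the recursion of get_reduced_words; fuel is a totality guard only (never exhausted for
-- fuel > countInv w, since each descent swap removes exactly one inversion)
def grwFuel : Nat → List Int → List (List Int)
  | 0, _ => []
  | f + 1, w =>
    let des := pyDescents w
    if des.length = 0 then [[]]
    else des.foldl (fun out d => out ++ (grwFuel f (pySwap w d (d + 1))).map (fun rw => d :: rw)) []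

def get_reduced_words (w : List Int) : List (List Int) := grwFuel (countInv w + 1) w

-- ===== PORT B =====

-- port of Source B's "u[d-1], u[d] = u[d], u[d-1]" (indices in range at every call)
def swapPairB (v : List Int) (d : Int) : List Int :=
  let x := PySem.List.pyGetD v d 0
  let y := PySem.List.pyGetD v (d - 1) 0
  PySem.List.pySetD (PySem.List.pySetD v (d - 1) x) d y

-- port of go(v) with the cache threaded through; fuel is a totality guard only (a chain of
-- cache misses strictly decreases countInv, so fuel > countInv v is never exhausted)
def memoB : Nat → PySem.Dict (List Int) (List (List Int)) → List Int →
    List (List Int) × PySem.Dict (List Int) (List (List Int))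
  | 0, c, _ => ([], c)
  | f + 1, c, v =>
    match PySem.Dict.get? c v with
    | some r => (r, c)
    | none =>
      let des := pyDescents v
      let rc :=
        if des = [] then ([[]], c)
        else
          des.foldl
            (fun oc d =>
              let rc := memoB f oc.2 (swapPairB v d)
              (oc.1 ++ rc.1.map (fun rw => d :: rw), rc.2)) ([], c)
      (rc.1, PySem.Dict.insert rc.2 v rc.1)

def get_reduced_words_alt (w : List Int) : List (List Int) :=
  (memoB (countInv w + 1) PySem.Dict.empty w).1

-- ===== PRECONDITION & SPEC =====
def Spec_get_reduced_words (w : List Int) (out : List (List Int)) : Prop := out = get_reduced_words_alt w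
instance (w : List Int) (out : List (List Int)) : Decidable (Spec_get_reduced_words w out) := by unfold Spec_get_reduced_words; infer_instance

-- ===== CLAIM (what is proved, stated in full; the proofs are below) =====
def Claim_equal_get_reduced_words : Prop := ∀ (w : List Int), Dom_get_reduced_words w → Spec_get_reduced_words w (get_reduced_words w)

-- ===== LEMMAS AND PROOFS =====

-- specification-level adjacent swap at 0-based position p
def swapAt : Nat → List Int → List Int
  | 0, a :: b :: t => b :: a :: t
  | p + 1, a :: t => a :: swapAt p t
  | _, l => l

lemma swapAt_perm : ∀ (p : Nat) (w : List Int), (swapAt p w).Perm w := by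
  intro p w
  induction w generalizing p with
  | nil => cases p <;> simp [swapAt]
  | cons a t ih =>
    cases p with
    | zero =>
      cases t with
      | nil => simp [swapAt]
      | cons b t' => simpa [swapAt] using List.Perm.swap a b t'
    | succ p => simpa [swapAt] using (ih p).cons a

lemma countInv_swapAt : ∀ (p : Nat) (w : List Int), p + 1 < w.length →
    w.getD (p + 1) 0 < w.getD p 0 → countInv (swapAt p w) + 1 = countInv w := by
  intro p
  induction p with
  | zero =>
    intro w h hd
    match w, h with
    | a :: b :: t, _ =>
      simp only [List.getD_cons_succ, List.getD_cons_zero] at hd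
      simp only [swapAt, countInv, List.countP_cons]
      have h1 : decide (a < b) = false := by simp [not_lt.mpr (le_of_lt hd)]
      have h2 : decide (b < a) = true := by simp [hd]
      simp [h1, h2]; omega
  | succ p ih =>
    intro w h hd
    match w, h with
    | a :: t, h' =>
      simp only [List.getD_cons_succ] at hd
      have ht : p + 1 < t.length := by simp at h'; omega
      simp only [swapAt, countInv]
      rw [(swapAt_perm p t).countP_eq]
      have := ih t ht hd
      omega

lemma set_set_swapAt : ∀ (w : List Int) (p : Nat), p + 1 < w.length →
    (w.set p (w.getD (p + 1) 0)).set (p + 1) (w.getD p 0) = swapAt p w := by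
  intro w
  induction w with
  | nil => intro p h; simp at h
  | cons a t ih =>
    intro p h
    cases p with
    | zero =>
      match t, h with
      | b :: t', _ => simp [swapAt]
    | succ p =>
      have ht : p + 1 < t.length := by simpa using h
      simpa [swapAt] using ih p ht

lemma pySwap_eq_swapAt (w : List Int) (p : Nat) (h : p + 1 < w.length) :
    pySwap w ((p : Int) + 1) ((p : Int) + 2) = swapAt p w := by
  have hp : p < w.length := by omega
  have e1 : ((p : Int) + 1) - 1 = (p : Int) := by ring
  have e2 : ((p : Int) + 2) - 1 = ((p + 1 : Nat) : Int) := by push_cast; ring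
  simp only [pySwap, e1, e2, PySem.List.pyGetD_natCast, PySem.List.pySetD_natCast]
  exact set_set_swapAt w p h

lemma swapPairB_eq_swapAt (w : List Int) (p : Nat) (h : p + 1 < w.length) :
    swapPairB w ((p : Int) + 1) = swapAt p w := by
  have e2 : ((p : Int) + 1) = ((p + 1 : Nat) : Int) := by push_cast; ring
  have e1 : (((p + 1 : Nat) : Int)) - 1 = (p : Int) := by push_cast; ring
  simp only [swapPairB]
  rw [e2, e1]
  simp only [PySem.List.pyGetD_natCast, PySem.List.pySetD_natCast]
  exact set_set_swapAt w p h

lemma mem_pyDescents {w : List Int} {d : Int} (hd : d ∈ pyDescents w) :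
    ∃ p : Nat, d = (p : Int) + 1 ∧ p + 1 < w.length ∧ w.getD (p + 1) 0 < w.getD p 0 := by
  rw [pyDescents, PySem.List.foldl_append_ite
      (p := fun i => PySem.List.pyGetD w (i + 1) 0 < PySem.List.pyGetD w i 0)
      (f := fun i => i + 1)] at hd
  simp only [List.nil_append, List.mem_map, List.mem_filter] at hd
  obtain ⟨i, ⟨hiR, hcond⟩, hdi⟩ := hd
  rw [PySem.List.mem_pyRange_one] at hiR
  refine ⟨i.toNat, ?_, ?_, ?_⟩
  · omega
  · omega
  · have e2 : i + 1 = ((i.toNat + 1 : Nat) : Int) := by omega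
    have e1 : i = ((i.toNat : Nat) : Int) := by omega
    rw [e2, e1, PySem.List.pyGetD_natCast, PySem.List.pyGetD_natCast] at hcond
    exact of_decide_eq_true hcond

-- each descent swap removes exactly one inversion (for A's swap and for B's tuple swap)
lemma descent_step {w : List Int} {d : Int} (hd : d ∈ pyDescents w) :
    countInv (pySwap w d (d + 1)) + 1 = countInv w := by
  obtain ⟨p, rfl, hlen, hlt⟩ := mem_pyDescents hd
  have : (p : Int) + 1 + 1 = (p : Int) + 2 := by ring
  rw [this, pySwap_eq_swapAt w p hlen]
  exact countInv_swapAt p w hlen hlt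

lemma swapPairB_eq_pySwap {w : List Int} {d : Int} (hd : d ∈ pyDescents w) :
    swapPairB w d = pySwap w d (d + 1) := by
  obtain ⟨p, rfl, hlen, _⟩ := mem_pyDescents hd
  have : (p : Int) + 1 + 1 = (p : Int) + 2 := by ring
  rw [this, pySwap_eq_swapAt w p hlen, swapPairB_eq_swapAt w p hlen]

-- the fuel is irrelevant as soon as it exceeds the inversion count
lemma grwFuel_fuel_irrel : ∀ (f g : Nat) (w : List Int), countInv w < f → countInv w < g →
    grwFuel f w = grwFuel g w := by
  intro f
  induction f with
  | zero => intro g w hf _; omega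
  | succ f ih =>
    intro g w hf hg
    match g, hg with
    | g + 1, _ =>
      simp only [grwFuel]
      by_cases h0 : (pyDescents w).length = 0
      · simp [h0]
      · simp only [h0, if_false]
        refine PySem.List.foldl_congr_mem _ _ _ _ ?_
        intro acc d hdm
        have hstep := descent_step hdm
        have h1 : countInv (pySwap w d (d + 1)) < f := by omega
        have h2 : countInv (pySwap w d (d + 1)) < g := by omega
        rw [ih g (pySwap w d (d + 1)) h1 h2]

-- the one-step unfolding of A in flatMap form
lemma A_unfold (w : List Int) :
    get_reduced_words w =
      if pyDescents w = [] then [[]]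
      else (pyDescents w).flatMap
        (fun d => (get_reduced_words (pySwap w d (d + 1))).map (fun rw => d :: rw)) := by
  by_cases h0 : pyDescents w = []
  · simp [get_reduced_words, grwFuel, h0]
  · have hl : ¬ (pyDescents w).length = 0 := by simpa [List.length_eq_zero_iff] using h0
    rw [get_reduced_words]
    simp only [grwFuel, hl, if_false]
    rw [PySem.List.foldl_append_eq_flatMap
        (g := fun d => (grwFuel (countInv w) (pySwap w d (d + 1))).map (fun rw => d :: rw))]
    rw [List.nil_append, if_neg h0]
    apply List.flatMap_congr
    intro d hdm
    have hstep := descent_step hdm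
    have : grwFuel (countInv w) (pySwap w d (d + 1)) = get_reduced_words (pySwap w d (d + 1)) := by
      rw [get_reduced_words]
      exact grwFuel_fuel_irrel _ _ _ (by omega) (by omega)
    rw [this]

-- cache invariant: every stored value is the corresponding reduced-word list
def GoodC (c : PySem.Dict (List Int) (List (List Int))) : Prop :=
  ∀ v r, PySem.Dict.get? c v = some r → r = get_reduced_words v

lemma goodC_insert {c : PySem.Dict (List Int) (List (List Int))} {v : List Int}
    {r : List (List Int)} (hg : GoodC c) (hr : r = get_reduced_words v) :
    GoodC (PySem.Dict.insert c v r) := by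
  intro v' r' h'
  rw [PySem.Dict.get?_insert] at h'
  by_cases hv : v' = v
  · subst hv; simp at h'; subst h'; exact hr
  · simp [hv] at h'; exact hg v' r' h'

lemma loopAux (f : Nat)
    (IH : ∀ (c : PySem.Dict (List Int) (List (List Int))) (v : List Int),
      countInv v < f → GoodC c → (memoB f c v).1 = get_reduced_words v ∧ GoodC (memoB f c v).2)
    (w : List Int) :
    ∀ (des : List Int) (out : List (List Int)) (c : PySem.Dict (List Int) (List (List Int))),
      GoodC c → (∀ d ∈ des, countInv (swapPairB w d) < f) →
      (des.foldl (fun oc d =>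
          let rc := memoB f oc.2 (swapPairB w d)
          (oc.1 ++ rc.1.map (fun rw => d :: rw), rc.2)) (out, c)).1
        = out ++ des.flatMap (fun d => (get_reduced_words (swapPairB w d)).map (fun rw => d :: rw)) ∧
      GoodC (des.foldl (fun oc d =>
          let rc := memoB f oc.2 (swapPairB w d)
          (oc.1 ++ rc.1.map (fun rw => d :: rw), rc.2)) (out, c)).2 := by
  intro des
  induction des with
  | nil => intro out c hg _; simpa using hg
  | cons d rest ih =>
    intro out c hg hb
    have h1 := IH c (swapPairB w d) (hb d (List.mem_cons_self)) hg
    simp only [List.foldl_cons]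
    have h2 := ih (out ++ (memoB f c (swapPairB w d)).1.map (fun rw => d :: rw))
      (memoB f c (swapPairB w d)).2 h1.2 (fun d' hd' => hb d' (List.mem_cons_of_mem _ hd'))
    refine ⟨?_, h2.2⟩
    rw [h2.1, h1.1, List.flatMap_cons, List.append_assoc]

lemma memoB_main : ∀ (f : Nat) (c : PySem.Dict (List Int) (List (List Int))) (v : List Int),
    countInv v < f → GoodC c →
    (memoB f c v).1 = get_reduced_words v ∧ GoodC (memoB f c v).2 := by
  intro f
  induction f with
  | zero => intro c v hf _; omega
  | succ f ih =>
    intro c v hf hg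
    cases hc : PySem.Dict.get? c v with
    | some r =>
      simp only [memoB, hc]
      exact ⟨(hg v r hc).symm ▸ rfl, hg⟩
    | none =>
      by_cases h0 : pyDescents v = []
      · simp only [memoB, hc, h0, if_true]
        have hA : get_reduced_words v = [[]] := by rw [A_unfold, h0]; simp
        exact ⟨hA.symm, goodC_insert hg hA.symm⟩
      · have hb : ∀ d ∈ pyDescents v, countInv (swapPairB v d) < f := by
          intro d hdm
          rw [swapPairB_eq_pySwap hdm]
          have := descent_step hdm
          omega
        have hloop := loopAux f ih v (pyDescents v) [] c hg hb
        have hres : (((pyDescents v).foldl (fun oc d =>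
              let rc := memoB f oc.2 (swapPairB v d)
              (oc.1 ++ rc.1.map (fun rw => d :: rw), rc.2)) ([], c)).1)
            = get_reduced_words v := by
          rw [hloop.1, List.nil_append, A_unfold v, if_neg h0]
          apply List.flatMap_congr
          intro d hdm
          rw [swapPairB_eq_pySwap hdm]
        simp only [memoB, hc, h0, if_false]
        exact ⟨hres, goodC_insert hloop.2 hres⟩

-- ===== VERDICT (by name: the statement is the Claim_ definition above) =====
theorem get_reduced_words_spec : Claim_equal_get_reduced_words := by
  intro w _
  unfold Spec_get_reduced_words get_reduced_words_alt
  have hg : GoodC PySem.Dict.empty := by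
    intro v r h
    rw [PySem.Dict.get?_empty] at h
    exact absurd h (by simp)
  exact ((memoB_main (countInv w + 1) PySem.Dict.empty w (Nat.lt_succ_self _) hg).1).symm
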